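-- pv_equiv track=rewrite | github.com/kelvinhuang0327/number-pattern-research | tools/auto_discovery_biglotto.py | cooccurrence_transition_pairs
-- ===== SOURCE A (Python) =====
-- from collections import Counter, defaultdict
-- from itertools import combinations
--
-- MAX_NUM = 49
--
-- PICK = 6
--
-- def cooccurrence_transition_pairs(history, window=50):
--     """A2: 前期號碼對 → 本期號碼對 的轉移"""
--     recent = history[-window:]
--     pair_trans = Counter()
--     for i in range(len(recent) - 1):
--         prev_pairs = set(combinations(sorted(recent[i]['numbers'][:PICK]), 2))
--         next_nums = set(recent[i + 1]['numbers'][:PICK])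
--         for pp in prev_pairs:
--             for n in next_nums:
--                 pair_trans[(pp, n)] += 1
--     last_pairs = set(combinations(sorted(history[-1]['numbers'][:PICK]), 2))
--     scores = Counter()
--     for pp in last_pairs:
--         for n in range(1, MAX_NUM + 1):
--             scores[n] += pair_trans.get((pp, n), 0)
--     return sorted([n for n, _ in sorted(scores.items(), key=lambda x: -x[1])[:PICK]])
-- ===== SOURCE B (Python) =====
-- from itertools import combinations
--
-- MAX_NUM = 49
-- PICK = 6
--
-- def cooccurrence_transition_pairs(history, window=50):
--     """A2 rewrite: score each candidate directly from the step list; no transition Counter."""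
--     recent = history[-window:]
--     last_pairs = set(combinations(sorted(history[-1]['numbers'][:PICK]), 2))
--     if not last_pairs:
--         return []
--     steps = [(set(combinations(sorted(recent[i]['numbers'][:PICK]), 2)),
--               set(recent[i + 1]['numbers'][:PICK]))
--              for i in range(len(recent) - 1)]
--     def score(n):
--         return sum(len(last_pairs & prev) for prev, nxt in steps if n in nxt)
--     top = sorted(range(1, MAX_NUM + 1), key=lambda n: -score(n))[:PICK]
--     return sorted(top)
-- ===== Notes on version B (the rewrite author's own statement) =====
-- stated objective: alternative
-- what changed: B never builds the (pair,next-number)->count transition Counter: it precomputes last_pairs, turns the history into a list of (prev-pairs,next-numbers) steps, and scores each candidate 1..49 directly as sum over steps containing it of |last_pairs & prev-pairs|, then takes the stable top 6.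
-- outside the precondition, e.g. on cooccurrence_transition_pairs([], 50): A raises IndexError, B raises IndexError; on cooccurrence_transition_pairs([{}], 50): A raises KeyError, B raises KeyError
import Mathlib
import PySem

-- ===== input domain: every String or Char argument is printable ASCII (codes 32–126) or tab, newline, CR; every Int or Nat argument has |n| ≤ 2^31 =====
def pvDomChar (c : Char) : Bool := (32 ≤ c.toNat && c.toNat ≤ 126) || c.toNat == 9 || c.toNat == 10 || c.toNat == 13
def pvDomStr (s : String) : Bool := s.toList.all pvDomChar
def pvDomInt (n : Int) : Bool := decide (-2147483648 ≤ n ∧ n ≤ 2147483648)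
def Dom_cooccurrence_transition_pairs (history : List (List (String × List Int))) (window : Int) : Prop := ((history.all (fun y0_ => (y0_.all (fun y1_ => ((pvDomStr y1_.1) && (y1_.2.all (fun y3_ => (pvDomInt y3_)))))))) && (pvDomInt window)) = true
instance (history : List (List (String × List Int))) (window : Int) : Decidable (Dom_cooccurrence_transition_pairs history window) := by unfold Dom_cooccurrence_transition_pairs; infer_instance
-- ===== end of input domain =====

-- B rewrites the scoring: it never materialises A's (pair, next-number) transition Counter; instead it
-- builds the list of (prev-pairs, next-numbers) steps once and scores each candidate 1..49 directly as
-- the sum, over steps whose next draw contains it, of |last_pairs ∩ prev-pairs| (same value, same ties).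

-- shared code: d['numbers'][:PICK]  and  set(combinations(sorted(l), 2)) — both Pythons contain these expressions verbatim
def pvNums6 (d : List (String × List Int)) : List Int :=
  PySem.List.slice ((PySem.Dict.mk d).getD "numbers" []) none (some 6)
def pvPairs (l : List Int) : PySem.Set (List Int) :=
  PySem.Set.ofList (PySem.List.combinations (PySem.List.sorted l (fun x => x) false) 2)
def pvPrev (recent : List (List (String × List Int))) (i : Int) : PySem.Set (List Int) :=
  pvPairs (pvNums6 (PySem.List.pyGetD recent i []))
def pvNext (recent : List (List (String × List Int))) (i : Int) : PySem.Set Int :=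
  PySem.Set.ofList (pvNums6 (PySem.List.pyGetD recent (i + 1) []))

-- ===== PORT A =====
def pvTrans (recent : List (List (String × List Int))) : PySem.Dict (List Int × Int) Int :=
  (PySem.List.pyRange 0 ((recent.length : Int) - 1) 1).foldl
    (fun d i =>
      (pvPrev recent i).foldl (fun d pp =>
        (pvNext recent i).foldl (fun d n => d.insert (pp, n) (d.getD (pp, n) 0 + 1)) d) d)
    PySem.Dict.empty

def pvScores (t : PySem.Dict (List Int × Int) Int) (lp : PySem.Set (List Int)) : PySem.Dict Int Int :=
  lp.foldl (fun s pp =>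
      (PySem.List.pyRange 1 50 1).foldl (fun s n => s.insert n (s.getD n 0 + t.getD (pp, n) 0)) s)
    PySem.Dict.empty

def cooccurrence_transition_pairs (history : List (List (String × List Int))) (window : Int) : List Int :=
  let recent := PySem.List.slice history (some (-window)) none
  let pair_trans := pvTrans recent
  let last_pairs := pvPairs (pvNums6 (PySem.List.pyGetD history (-1) []))
  let scores := pvScores pair_trans last_pairs
  PySem.List.sorted (((PySem.List.sorted scores.items (fun x => -x.2) false).take 6).map (·.1)) (fun x => x) false

-- ===== PORT B =====
def pvSteps (recent : List (List (String × List Int))) : List (PySem.Set (List Int) × PySem.Set Int) :=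
  (PySem.List.pyRange 0 ((recent.length : Int) - 1) 1).map (fun i => (pvPrev recent i, pvNext recent i))

def pvScore (lp : PySem.Set (List Int)) (steps : List (PySem.Set (List Int) × PySem.Set Int)) (n : Int) : Int :=
  ((steps.filter (fun s => PySem.Set.contains s.2 n)).map
    (fun s => ((PySem.Set.len (PySem.Set.inter lp s.1)) : Int))).sum

def cooccurrence_transition_pairs_alt (history : List (List (String × List Int))) (window : Int) : List Int :=
  let recent := PySem.List.slice history (some (-window)) none
  let last_pairs := pvPairs (pvNums6 (PySem.List.pyGetD history (-1) []))
  if last_pairs.isEmpty then []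
  else
    let steps := pvSteps recent
    PySem.List.sorted
      ((PySem.List.sorted (PySem.List.pyRange 1 50 1) (fun n => -pvScore last_pairs steps n) false).take 6)
      (fun x => x) false

-- ===== PRECONDITION & SPEC =====
-- Pre_ excludes exactly the inputs where Python A raises: an empty history (IndexError on history[-1])
-- and histories where an accessed draw lacks the 'numbers' key (KeyError).
def pvHasNums (d : List (String × List Int)) : Prop := (PySem.Dict.mk d).contains "numbers" = true
def Pre_cooccurrence_transition_pairs (history : List (List (String × List Int))) (window : Int) : Prop :=
  history ≠ [] ∧
  (∀ d ∈ PySem.List.slice history (some (-1)) none, pvHasNums d) ∧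
  (2 ≤ (PySem.List.slice history (some (-window)) none).length →
    ∀ d ∈ PySem.List.slice history (some (-window)) none, pvHasNums d)
instance (history : List (List (String × List Int))) (window : Int) : Decidable (Pre_cooccurrence_transition_pairs history window) := by unfold Pre_cooccurrence_transition_pairs pvHasNums; infer_instance

def pvWitness_cooccurrence_transition_pairs : (List (List (String × List Int))) × Int :=
  ([[("numbers", [1, 2, 3, 4, 5, 6, 7])], [("numbers", [2, 3, 9])]], 50)

def Spec_cooccurrence_transition_pairs (history : List (List (String × List Int))) (window : Int) (out : List Int) : Prop := out = cooccurrence_transition_pairs_alt history window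
instance (history : List (List (String × List Int))) (window : Int) (out : List Int) : Decidable (Spec_cooccurrence_transition_pairs history window out) := by unfold Spec_cooccurrence_transition_pairs; infer_instance

-- ===== CLAIM (what is proved, stated in full; the proofs are below) =====
def Claim_equal_cooccurrence_transition_pairs : Prop := ∀ (history : List (List (String × List Int))) (window : Int), Dom_cooccurrence_transition_pairs history window → Pre_cooccurrence_transition_pairs history window → Spec_cooccurrence_transition_pairs history window (cooccurrence_transition_pairs history window)

-- ===== LEMMAS AND PROOFS =====

theorem pv_insertBy_map {α β : Type} (key : β → Int) (f : α → β) (x : α) (ys : List α) :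
    PySem.List.insertBy (fun a b => decide (key a < key b)) (f x) (ys.map f)
      = (PySem.List.insertBy (fun a b => decide (key (f a) < key (f b))) x ys).map f := by
  induction ys with
  | nil => simp [PySem.List.insertBy]
  | cons y t ih =>
    simp only [List.map_cons, PySem.List.insertBy]
    by_cases h : key (f x) < key (f y) <;> simp [h, ih]

theorem pv_sorted_map_key {α β : Type} (key : β → Int) (f : α → β) (xs : List α) :
    PySem.List.sorted (xs.map f) key false
      = (PySem.List.sorted xs (fun x => key (f x)) false).map f := by
  rw [PySem.List.sorted_eq_foldl_insertBy, PySem.List.sorted_eq_foldl_insertBy]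
  suffices h : ∀ (acc : List α), (xs.map f).foldl (fun acc x => PySem.List.insertBy (fun a b => decide (key a < key b)) x acc) (acc.map f)
      = (xs.foldl (fun acc x => PySem.List.insertBy (fun a b => decide (key (f a) < key (f b))) x acc) acc).map f by
    simpa using h []
  induction xs with
  | nil => intro acc; simp
  | cons x t ih =>
    intro acc
    simp only [List.map_cons, List.foldl_cons]
    rw [pv_insertBy_map, ← ih]
theorem pv_count_map_pair (pp pp' : List Int) (n : Int) (next : List Int) :
    (next.map (fun n' => (pp', n'))).count (pp, n)
      = if pp = pp' then next.count n else 0 := by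
  induction next with
  | nil => simp
  | cons m t ih =>
    simp only [List.map_cons, List.count_cons, ih]
    by_cases h : pp = pp' <;> by_cases h2 : m = n <;>
      simp [h, h2]
    exact fun h' => h h'.symm

theorem pv_step1 (prev : List (List Int)) (next : List Int) (d : PySem.Dict (List Int × Int) Int)
    (hp : prev.Nodup) (hn : next.Nodup) (pp : List Int) (n : Int) :
    ((prev.foldl (fun d pp' =>
        (next.foldl (fun d n' => d.insert (pp', n') (d.getD (pp', n') 0 + 1)) d)) d).getD (pp, n) 0)
      = d.getD (pp, n) 0 + (if pp ∈ prev ∧ n ∈ next then 1 else 0) := by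
  induction prev generalizing d with
  | nil => simp
  | cons q t ih =>
    simp only [List.foldl_cons]
    rw [ih _ (List.Nodup.of_cons hp)]
    have hinner : (next.foldl (fun d n' => d.insert (q, n') (d.getD (q, n') 0 + 1)) d).getD (pp, n) 0
        = d.getD (pp, n) 0 + (if pp = q then next.count n else 0) := by
      have := PySem.Dict.getD_foldl_insert_add_one (l := next.map (fun n' => (q, n'))) (d := d) (v := (pp, n))
      rw [List.foldl_map] at this
      rw [this, pv_count_map_pair]
    rw [hinner]
    have hc : next.count n = if n ∈ next then 1 else 0 := by
      by_cases h : n ∈ next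
      · simp [h, List.count_eq_one_of_mem hn h]
      · simp [h, List.count_eq_zero_of_not_mem h]
    have hq : pp ∉ t ∨ pp ≠ q := by
      rcases List.nodup_cons.mp hp with ⟨hq, _⟩
      by_cases h : pp = q
      · subst h; exact Or.inl hq
      · exact Or.inr h
    by_cases h1 : pp = q <;> by_cases h2 : n ∈ next <;> by_cases h3 : pp ∈ t <;>
      simp_all
theorem pv_ctr (recent : List (List (String × List Int))) (is : List Int)
    (d : PySem.Dict (List Int × Int) Int) (pp : List Int) (n : Int) :
    ((is.foldl (fun d i =>
        (pvPrev recent i).foldl (fun d pp' =>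
          (pvNext recent i).foldl (fun d n' => d.insert (pp', n') (d.getD (pp', n') 0 + 1)) d) d) d).getD (pp, n) 0)
      = d.getD (pp, n) 0
        + ((is.map (fun i => if pp ∈ pvPrev recent i ∧ n ∈ pvNext recent i then (1 : Int) else 0)).sum) := by
  induction is generalizing d with
  | nil => simp
  | cons i t ih =>
    simp only [List.foldl_cons, List.map_cons, List.sum_cons, ih]
    rw [pv_step1 _ _ _ (by simp [pvPrev, pvPairs, PySem.Set.nodup_ofList]) (by simp [pvNext, PySem.Set.nodup_ofList])]
    ring

theorem pv_getD_pass (ns : List Int) (hn : ns.Nodup) (c : Int → Int) (s : PySem.Dict Int Int) (n : Int) :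
    ((ns.foldl (fun s n' => s.insert n' (s.getD n' 0 + c n')) s).getD n 0)
      = s.getD n 0 + (if n ∈ ns then c n else 0) := by
  induction ns generalizing s with
  | nil => simp
  | cons m t ih =>
    simp only [List.foldl_cons]
    rw [ih (List.Nodup.of_cons hn)]
    rcases List.nodup_cons.mp hn with ⟨hm, _⟩
    by_cases h : n = m
    · subst h
      simp [PySem.Dict.getD_insert_self, hm]
    · simp [PySem.Dict.getD_insert, h]

theorem pv_set_update_subset {α : Type} [BEq α] [LawfulBEq α] (s : PySem.Set α) (xs : List α)
    (h : ∀ x ∈ xs, x ∈ s) : PySem.Set.update s xs = s := by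
  induction xs generalizing s with
  | nil => rfl
  | cons x t ih =>
    have hx : PySem.Set.add s x = s := by
      simp [PySem.Set.add, PySem.Set.contains, h x (by simp)]
    show PySem.Set.update (PySem.Set.add s x) t = s
    rw [hx]
    exact ih s (fun y hy => h y (by simp [hy]))
theorem pv_pass_keys (c : Int → Int) (s : PySem.Dict Int Int) :
    ((PySem.List.pyRange 1 50 1).foldl (fun s n => s.insert n (s.getD n 0 + c n)) s).keys
      = PySem.Set.update s.keys (PySem.List.pyRange 1 50 1) :=
  PySem.Dict.keys_foldl_insert ..

theorem pv_scores_keys_aux (t : PySem.Dict (List Int × Int) Int) (lp : List (List Int))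
    (s : PySem.Dict Int Int) (hs : s.keys = PySem.List.pyRange 1 50 1) :
    (lp.foldl (fun s pp =>
      (PySem.List.pyRange 1 50 1).foldl (fun s n => s.insert n (s.getD n 0 + t.getD (pp, n) 0)) s) s).keys
      = PySem.List.pyRange 1 50 1 := by
  induction lp generalizing s with
  | nil => exact hs
  | cons q tl ih =>
    simp only [List.foldl_cons]
    exact ih _ (by rw [pv_pass_keys, hs]; exact pv_set_update_subset _ _ (fun x hx => hx))

theorem pv_scores_keys (t : PySem.Dict (List Int × Int) Int) (lp : PySem.Set (List Int)) :
    (pvScores t lp).keys = if lp.isEmpty then [] else PySem.List.pyRange 1 50 1 := by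
  cases lp with
  | nil => simp [pvScores, PySem.Dict.keys_empty]
  | cons q tl =>
    rw [if_neg (by simp)]
    simp only [pvScores, List.foldl_cons]
    refine pv_scores_keys_aux t tl _ ?_
    rw [pv_pass_keys, PySem.Dict.keys_empty]
    exact PySem.Set.ofList_eq_self_of_nodup _ (PySem.List.nodup_pyRange_one ..)

theorem pv_scores_getD_aux (t : PySem.Dict (List Int × Int) Int) (lp : List (List Int))
    (s : PySem.Dict Int Int) (n : Int) :
    (lp.foldl (fun s pp =>
      (PySem.List.pyRange 1 50 1).foldl (fun s n => s.insert n (s.getD n 0 + t.getD (pp, n) 0)) s) s).getD n 0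
      = s.getD n 0 + (if n ∈ PySem.List.pyRange 1 50 1 then (lp.map (fun pp => t.getD (pp, n) 0)).sum else 0) := by
  induction lp generalizing s with
  | nil => simp
  | cons q tl ih =>
    simp only [List.foldl_cons]
    rw [ih, pv_getD_pass _ (PySem.List.nodup_pyRange_one ..)]
    by_cases h : n ∈ PySem.List.pyRange 1 50 1 <;> simp [h]; ring

theorem pv_scores_getD (t : PySem.Dict (List Int × Int) Int) (lp : PySem.Set (List Int)) (n : Int) :
    (pvScores t lp).getD n 0
      = if n ∈ PySem.List.pyRange 1 50 1 then (lp.map (fun pp => t.getD (pp, n) 0)).sum else 0 := by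
  have := pv_scores_getD_aux t lp PySem.Dict.empty n
  simpa [pvScores] using this

theorem pv_scores_items (t : PySem.Dict (List Int × Int) Int) (lp : PySem.Set (List Int)) (h : ¬ lp.isEmpty = true) :
    (pvScores t lp).items
      = (PySem.List.pyRange 1 50 1).map (fun n => (n, (lp.map (fun pp => t.getD (pp, n) 0)).sum)) := by
  have hk := pv_scores_keys t lp
  rw [if_neg h] at hk
  have hnd : (pvScores t lp).keys.Nodup := by rw [hk]; exact PySem.List.nodup_pyRange_one ..
  rw [PySem.Dict.items_eq_map_keys _ hnd 0, hk]
  refine List.map_congr_left (fun n hn => ?_)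
  rw [pv_scores_getD, if_pos hn]

theorem pv_sum_comm {α β : Type} (xs : List α) (ys : List β) (f : α → β → Int) :
    (xs.map (fun a => ((ys.map (f a)).sum))).sum = (ys.map (fun b => ((xs.map (fun a => f a b)).sum))).sum := by
  induction xs with
  | nil => simp
  | cons x tl ih =>
    simp only [List.map_cons, List.sum_cons, ih]
    rw [← PySem.List.sum_map_add_int]

theorem pv_filtered_sum {α : Type} (l : List α) (p : α → Bool) (g : α → Int) :
    ((l.filter p).map g).sum = (l.map (fun x => if p x then g x else 0)).sum := by
  induction l with
  | nil => rfl
  | cons x tl ih =>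
    by_cases h : p x <;> simp [h, ih]

theorem pv_score_eq (recent : List (List (String × List Int))) (lp : PySem.Set (List Int)) (n : Int) :
    (lp.map (fun pp => (pvTrans recent).getD (pp, n) 0)).sum = pvScore lp (pvSteps recent) n := by
  have hT : ∀ pp, (pvTrans recent).getD (pp, n) 0
      = ((PySem.List.pyRange 0 ((recent.length : Int) - 1) 1).map
          (fun i => if pp ∈ pvPrev recent i ∧ n ∈ pvNext recent i then (1 : Int) else 0)).sum := by
    intro pp
    rw [pvTrans, pv_ctr]
    simp
  calc (lp.map (fun pp => (pvTrans recent).getD (pp, n) 0)).sum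
      = (lp.map (fun pp => ((PySem.List.pyRange 0 ((recent.length : Int) - 1) 1).map
          (fun i => if pp ∈ pvPrev recent i ∧ n ∈ pvNext recent i then (1 : Int) else 0)).sum)).sum := by
        exact congrArg _ (List.map_congr_left (fun pp _ => hT pp))
    _ = ((PySem.List.pyRange 0 ((recent.length : Int) - 1) 1).map
          (fun i => (lp.map (fun pp => if pp ∈ pvPrev recent i ∧ n ∈ pvNext recent i then (1 : Int) else 0)).sum)).sum := by
        exact pv_sum_comm ..
    _ = pvScore lp (pvSteps recent) n := by
        rw [pvScore, pvSteps, List.filter_map, List.map_map, pv_filtered_sum]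
        refine congrArg _ (List.map_congr_left (fun i _ => ?_))
        simp only [Function.comp_apply]
        by_cases hN : n ∈ pvNext recent i
        · rw [if_pos (by simp [hN])]
          simp only [hN, and_true]
          have h1 : (fun pp => if pp ∈ pvPrev recent i then (1:Int) else 0)
              = (fun pp => if PySem.Set.contains (pvPrev recent i) pp then 1 else 0) := by
            funext pp; simp
          rw [h1, PySem.List.sum_map_ite_one_zero]
          rw [show PySem.Set.len (PySem.Set.inter lp (pvPrev recent i))
              = (lp.filter (fun x => PySem.Set.contains (pvPrev recent i) x)).length from rfl]
          rw [← List.countP_eq_length_filter]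
        · rw [if_neg (by simp [hN])]
          simp [hN]
theorem pv_main_eq (recent : List (List (String × List Int))) (lp : PySem.Set (List Int))
    (h : ¬ lp.isEmpty = true) :
    PySem.List.sorted (((PySem.List.sorted (pvScores (pvTrans recent) lp).items (fun x => -x.2) false).take 6).map (·.1)) (fun x => x) false
      = PySem.List.sorted ((PySem.List.sorted (PySem.List.pyRange 1 50 1) (fun n => -pvScore lp (pvSteps recent) n) false).take 6) (fun x => x) false := by
  rw [pv_scores_items _ _ h]
  rw [pv_sorted_map_key (fun x => -x.2) (fun n => (n, (lp.map (fun pp => (pvTrans recent).getD (pp, n) 0)).sum)) (PySem.List.pyRange 1 50 1)]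
  rw [← List.map_take, List.map_map]
  have h2 : ((fun (x : Int × Int) => x.1) ∘ (fun n => (n, (lp.map (fun pp => (pvTrans recent).getD (pp, n) 0)).sum))) = id := by
    funext n; rfl
  rw [h2, List.map_id]
  have h3 : (fun n => -(lp.map (fun pp => (pvTrans recent).getD (pp, n) 0)).sum)
      = (fun n => -pvScore lp (pvSteps recent) n) := by
    funext n; rw [pv_score_eq]
  rw [h3]

theorem pv_spec (history : List (List (String × List Int))) (window : Int) :
    cooccurrence_transition_pairs history window = cooccurrence_transition_pairs_alt history window := by
  unfold cooccurrence_transition_pairs cooccurrence_transition_pairs_alt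
  by_cases h : (pvPairs (pvNums6 (PySem.List.pyGetD history (-1) []))).isEmpty
  · rw [if_pos h]
    rw [List.isEmpty_iff.mp h]
    rfl
  · rw [if_neg h]
    exact pv_main_eq _ _ h

-- ===== VERDICT (by name: the statement is the Claim_ definition above) =====
theorem cooccurrence_transition_pairs_spec : Claim_equal_cooccurrence_transition_pairs := by
  intro history window _ _
  unfold Spec_cooccurrence_transition_pairs
  exact pv_spec history window
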